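-- pv_equiv track=rewrite | github.com/marcus-aberg/advent-of-code | 2024/aoc02/aoc02.py | part2
-- ===== SOURCE A (Python) =====
-- def all_increasing(row: list[int]) -> bool:
--     return all(x > y for x, y in zip(row[1:], row))
--
-- def all_decreasing(row: list[int]) -> bool:
--     return all(x < y for x, y in zip(row[1:], row))
--
-- def all_differs_allowed(row: list[int]) -> bool:
--     return all(abs(x - y) <= 3 for x, y in zip(row[1:], row))
--
-- def row_is_ok(row):
--     return all_differs_allowed(row) and (all_increasing(row) or all_decreasing(row))
--
-- def part2(data):
--     """Solve part 2."""
--     ans = 0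
--     for row in data:
--         if row_is_ok(row):
--             ans += 1
--         else:
--             for i in range(len(row)):
--                 reduced_row = row.copy()
--                 reduced_row.pop(i)
--                 if row_is_ok(reduced_row):
--                     ans += 1
--                     break
--
--     return ans
-- ===== SOURCE B (Python) =====
-- def _ok(row, lo, hi):
--     for j in range(len(row) - 1):
--         d = row[j + 1] - row[j]
--         if d < lo or d > hi:
--             return False
--     return True
--
-- def _first_bad(row, lo, hi):
--     for j in range(len(row) - 1):
--         d = row[j + 1] - row[j]
--         if d < lo or d > hi:
--             return j
--     return None
--
-- def _safe(row, lo, hi):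
--     j = _first_bad(row, lo, hi)
--     if j is None:
--         return True
--     # only removing row[j] or row[j+1] can repair the first violation
--     return _ok(row[:j] + row[j + 1:], lo, hi) or _ok(row[:j + 1] + row[j + 2:], lo, hi)
--
-- def part2(data):
--     """Solve part 2."""
--     ans = 0
--     for row in data:
--         if _safe(row, 1, 3) or _safe(row, -3, -1):
--             ans += 1
--     return ans
-- ===== Notes on version B (the rewrite author's own statement) =====
-- stated objective: faster
-- what changed: Per direction (increasing 1..3 / decreasing -3..-1), B finds the first violating adjacent pair and only tests the two removals that can repair it, instead of A's trying every single-element removal and re-checking the whole row.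
import Mathlib
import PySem

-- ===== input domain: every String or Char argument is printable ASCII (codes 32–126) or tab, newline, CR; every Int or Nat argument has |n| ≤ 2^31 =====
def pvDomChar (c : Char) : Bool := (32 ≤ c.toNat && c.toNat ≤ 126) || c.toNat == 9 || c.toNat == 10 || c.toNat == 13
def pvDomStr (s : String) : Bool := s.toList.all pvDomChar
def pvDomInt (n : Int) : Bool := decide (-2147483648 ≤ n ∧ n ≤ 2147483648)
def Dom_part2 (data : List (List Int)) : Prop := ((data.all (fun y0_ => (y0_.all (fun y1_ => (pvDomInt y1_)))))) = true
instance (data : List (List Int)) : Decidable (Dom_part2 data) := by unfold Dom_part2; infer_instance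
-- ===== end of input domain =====

-- B finds, per direction, the first violating adjacent pair and tests only the two removals
-- that can repair it; A tries every single-element removal. Proved: equal return values.

-- ===== PORT A =====
-- all(x > y for x, y in zip(row[1:], row))
def all_increasing (row : List Int) : Bool :=
  ((row.drop 1).zip row).all (fun p => decide (p.1 > p.2))

def all_decreasing (row : List Int) : Bool :=
  ((row.drop 1).zip row).all (fun p => decide (p.1 < p.2))

def all_differs_allowed (row : List Int) : Bool :=
  ((row.drop 1).zip row).all (fun p => decide (|p.1 - p.2| ≤ 3))

def row_is_ok (row : List Int) : Bool :=
  all_differs_allowed row && (all_increasing row || all_decreasing row)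

-- for i in range(len(row)): reduced_row = row.copy(); reduced_row.pop(i);
-- if row_is_ok(reduced_row): ans += 1; break   -- the break-loop is the .any below
def part2 (data : List (List Int)) : Int :=
  data.foldl
    (fun ans row =>
      if row_is_ok row then ans + 1
      else if (List.range row.length).any (fun i => row_is_ok (row.eraseIdx i)) then ans + 1
      else ans)
    0

-- ===== PORT B =====
def bad (lo hi a b : Int) : Bool := b - a < lo || b - a > hi

-- _ok: loop over adjacent pairs, false at the first violation
def okB (lo hi : Int) : List Int → Bool
  | a :: b :: t => !bad lo hi a b && okB lo hi (b :: t)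
  | _ => true

-- _first_bad: loop over adjacent pairs with the running index j
def firstBadAux (lo hi : Int) : List Int → Nat → Option Nat
  | a :: b :: t, j => if bad lo hi a b then some j else firstBadAux lo hi (b :: t) (j + 1)
  | _, _ => none

-- _safe; row[:j] + row[j+1:] = row.eraseIdx j (j is an in-range pair index)
def safeB (lo hi : Int) (row : List Int) : Bool :=
  match firstBadAux lo hi row 0 with
  | none => true
  | some j => okB lo hi (row.eraseIdx j) || okB lo hi (row.eraseIdx (j + 1))

def part2_alt (data : List (List Int)) : Int :=
  data.foldl
    (fun ans row => if safeB 1 3 row || safeB (-3) (-1) row then ans + 1 else ans)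
    0

-- ===== PRECONDITION & SPEC =====
def Spec_part2 (data : List (List Int)) (out : Int) : Prop := out = part2_alt data
instance (data : List (List Int)) (out : Int) : Decidable (Spec_part2 data out) := by unfold Spec_part2; infer_instance

-- ===== CLAIM (what is proved, stated in full; the proofs are below) =====
def Claim_equal_part2 : Prop := ∀ (data : List (List Int)), Dom_part2 data → Spec_part2 data (part2 data)

-- ===== LEMMAS AND PROOFS =====

-- okB ↔ every adjacent pair is good
theorem okB_iff (lo hi : Int) (l : List Int) :
    okB lo hi l = true ↔ ∀ k, (h : k + 1 < l.length) → bad lo hi l[k] l[k+1] = false := by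
  induction l with
  | nil => simp [okB]
  | cons a t ih =>
      cases t with
      | nil => simp [okB]
      | cons b t2 =>
          simp only [okB, Bool.and_eq_true, Bool.not_eq_true', ih]
          constructor
          · rintro ⟨h0, hrest⟩ k hk
            cases k with
            | zero => simpa using h0
            | succ k => exact hrest k (by simpa using hk)
          · intro h
            refine ⟨by simpa using h 0 (by simp), fun k hk => ?_⟩
            simpa using h (k + 1) (by simpa using hk)

theorem firstBad_none (lo hi : Int) (l : List Int) (j0 : Nat)
    (h : firstBadAux lo hi l j0 = none) : okB lo hi l = true := by
  induction l generalizing j0 with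
  | nil => simp [okB]
  | cons a t ih =>
      cases t with
      | nil => simp [okB]
      | cons b t2 =>
          simp only [firstBadAux] at h
          split at h
          · exact absurd h (by simp)
          · rename_i hb
            simp only [okB, Bool.and_eq_true, Bool.not_eq_true']
            exact ⟨by simpa using hb, ih (j0 + 1) h⟩

theorem firstBad_some (lo hi : Int) (l : List Int) (j0 j : Nat)
    (h : firstBadAux lo hi l j0 = some j) :
    ∃ k, ∃ (h : k + 1 < l.length), j = j0 + k ∧ bad lo hi (l[k]'(by omega)) (l[k+1]'h) = true := by
  induction l generalizing j0 with
  | nil => simp [firstBadAux] at h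
  | cons a t ih =>
      cases t with
      | nil => simp [firstBadAux] at h
      | cons b t2 =>
          simp only [firstBadAux] at h
          split at h
          · rename_i hb
            injection h with h
            subst h
            refine ⟨0, by simp, by omega, by simpa using hb⟩
          · obtain ⟨k, hlen, hk, hbad⟩ := ih (j0 + 1) h
            refine ⟨k + 1, by simpa using hlen, by omega, by simpa using hbad⟩

-- removing an element away from a violating pair cannot repair it
theorem okB_erase_false (lo hi : Int) (l : List Int) (k i : Nat)
    (hk : k + 1 < l.length) (hbad : bad lo hi l[k] l[k+1] = true)
    (hi' : i < l.length) (h1 : i ≠ k) (h2 : i ≠ k + 1) :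
    okB lo hi (l.eraseIdx i) = false := by
  by_contra h
  rw [Bool.not_eq_false, okB_iff] at h
  have hlen : (l.eraseIdx i).length = l.length - 1 := List.length_eraseIdx_of_lt hi'
  rcases Nat.lt_or_ge i k with hik | hik
  · -- pair sits at positions (k-1, k) after erasing i < k
    have hke : k - 1 + 1 < (l.eraseIdx i).length := by omega
    have hthis := h (k - 1) hke
    rw [List.getElem_eraseIdx_of_ge _ (by omega), List.getElem_eraseIdx_of_ge _ (by omega)] at hthis
    simp only [show k - 1 + 1 = k from by omega] at hthis
    exact absurd hbad (by simp [hthis])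
  · -- i > k + 1 : pair still at positions (k, k+1)
    have hke : k + 1 < (l.eraseIdx i).length := by omega
    have hthis := h k hke
    rw [List.getElem_eraseIdx_of_lt _ (by omega), List.getElem_eraseIdx_of_lt _ (by omega)] at hthis
    exact absurd hbad (by simp [hthis])

-- step lemmas for A's zip-based checks
theorem all_inc_cons (a b : Int) (t : List Int) :
    all_increasing (a :: b :: t) = (decide (b > a) && all_increasing (b :: t)) := by
  simp [all_increasing]

theorem all_dec_cons (a b : Int) (t : List Int) :
    all_decreasing (a :: b :: t) = (decide (b < a) && all_decreasing (b :: t)) := by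
  simp [all_decreasing]

theorem all_diff_cons (a b : Int) (t : List Int) :
    all_differs_allowed (a :: b :: t) = (decide (|b - a| ≤ 3) && all_differs_allowed (b :: t)) := by
  simp [all_differs_allowed]

theorem diff_inc_okB (l : List Int) :
    (all_differs_allowed l && all_increasing l) = okB 1 3 l := by
  induction l with
  | nil => rfl
  | cons a t ih =>
      cases t with
      | nil => rfl
      | cons b t2 =>
          rw [all_inc_cons, all_diff_cons]
          rw [show okB 1 3 (a :: b :: t2) = (!bad 1 3 a b && okB 1 3 (b :: t2)) from rfl, ← ih]
          rw [Bool.eq_iff_iff]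
          simp only [Bool.and_eq_true, Bool.not_eq_true', decide_eq_true_iff, bad,
            Bool.or_eq_false_iff, decide_eq_false_iff_not, abs_le]
          constructor
          · rintro ⟨⟨hd, hD⟩, hi, hI⟩; exact ⟨⟨by omega, by omega⟩, hD, hI⟩
          · rintro ⟨⟨h1, h2⟩, hD, hI⟩; exact ⟨⟨by omega, hD⟩, by omega, hI⟩

theorem diff_dec_okB (l : List Int) :
    (all_differs_allowed l && all_decreasing l) = okB (-3) (-1) l := by
  induction l with
  | nil => rfl
  | cons a t ih =>
      cases t with
      | nil => rfl
      | cons b t2 =>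
          rw [all_dec_cons, all_diff_cons]
          rw [show okB (-3) (-1) (a :: b :: t2) = (!bad (-3) (-1) a b && okB (-3) (-1) (b :: t2)) from rfl, ← ih]
          rw [Bool.eq_iff_iff]
          simp only [Bool.and_eq_true, Bool.not_eq_true', decide_eq_true_iff, bad,
            Bool.or_eq_false_iff, decide_eq_false_iff_not, abs_le]
          constructor
          · rintro ⟨⟨hd, hD⟩, hi, hI⟩; exact ⟨⟨by omega, by omega⟩, hD, hI⟩
          · rintro ⟨⟨h1, h2⟩, hD, hI⟩; exact ⟨⟨by omega, hD⟩, by omega, hI⟩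

theorem row_is_ok_eq (l : List Int) :
    row_is_ok l = (okB 1 3 l || okB (-3) (-1) l) := by
  rw [row_is_ok, Bool.and_or_distrib_left, diff_inc_okB, diff_dec_okB]

-- chain true forces firstBad = none
theorem firstBad_of_okB (lo hi : Int) (l : List Int) (hok : okB lo hi l = true) :
    firstBadAux lo hi l 0 = none := by
  cases hfb : firstBadAux lo hi l 0 with
  | none => rfl
  | some j =>
      obtain ⟨k, hlen, -, hbad⟩ := firstBad_some lo hi l 0 j hfb
      rw [okB_iff] at hok
      rw [hok k hlen] at hbad
      exact absurd hbad (by simp)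

-- one-direction safety from a successful erase
theorem safeB_of_erase (lo hi : Int) (row : List Int) (i : Nat) (hi' : i < row.length)
    (hok : okB lo hi (row.eraseIdx i) = true) : safeB lo hi row = true := by
  unfold safeB
  cases hfb : firstBadAux lo hi row 0 with
  | none => rfl
  | some j =>
      obtain ⟨k, hlen, hk0, hbad⟩ := firstBad_some lo hi row 0 j hfb
      have hjk : j = k := by omega
      rw [hjk]
      show (okB lo hi (row.eraseIdx k) || okB lo hi (row.eraseIdx (k + 1))) = true
      by_cases h1 : i = k
      · rw [← h1]; simp [hok]
      · by_cases h2 : i = k + 1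
        · rw [← h2]; simp [hok]
        · have := okB_erase_false lo hi row k i hlen hbad hi' h1 h2
          rw [this] at hok; exact absurd hok (by simp)

-- the key per-row equality
theorem per_row (row : List Int) :
    (row_is_ok row || (List.range row.length).any (fun i => row_is_ok (row.eraseIdx i)))
      = (safeB 1 3 row || safeB (-3) (-1) row) := by
  rw [Bool.eq_iff_iff]
  simp only [Bool.or_eq_true, List.any_eq_true, List.mem_range, row_is_ok_eq]
  constructor
  · rintro (h | ⟨i, hi', h⟩)
    · rcases h with h1 | h1
      · left; unfold safeB; rw [firstBad_of_okB 1 3 row h1]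
      · right; unfold safeB; rw [firstBad_of_okB (-3) (-1) row h1]
    · rcases h with h1 | h1
      · exact Or.inl (safeB_of_erase 1 3 row i hi' h1)
      · exact Or.inr (safeB_of_erase (-3) (-1) row i hi' h1)
  · have dir : ∀ lo hi : Int, safeB lo hi row = true →
        (okB lo hi row = true ∨ ∃ i, i < row.length ∧ okB lo hi (row.eraseIdx i) = true) := by
      intro lo hi hs
      unfold safeB at hs
      cases hfb : firstBadAux lo hi row 0 with
      | none => exact Or.inl (firstBad_none lo hi row 0 hfb)
      | some j =>
          rw [hfb] at hs
          obtain ⟨k, hlen, hk0, -⟩ := firstBad_some lo hi row 0 j hfb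
          rcases Bool.or_eq_true_iff.mp hs with h1 | h1
          · exact Or.inr ⟨j, by omega, h1⟩
          · exact Or.inr ⟨j + 1, by omega, h1⟩
    rintro (hs | hs)
    · rcases dir 1 3 hs with h | ⟨i, hi', h⟩
      · exact Or.inl (by simp [h])
      · exact Or.inr ⟨i, hi', by simp [h]⟩
    · rcases dir (-3) (-1) hs with h | ⟨i, hi', h⟩
      · exact Or.inl (by simp [h])
      · exact Or.inr ⟨i, hi', by simp [h]⟩

-- ===== VERDICT (by name: the statement is the Claim_ definition above) =====
theorem part2_spec : Claim_equal_part2 := by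
  intro data _
  unfold Spec_part2 part2 part2_alt
  congr 1
  funext ans row
  rw [show (if row_is_ok row then ans + 1
      else if (List.range row.length).any (fun i => row_is_ok (row.eraseIdx i)) then ans + 1 else ans)
    = (if (row_is_ok row || (List.range row.length).any (fun i => row_is_ok (row.eraseIdx i))) then ans + 1 else ans) by
      by_cases h : row_is_ok row = true <;> simp [h]]
  rw [per_row]
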